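-- pv_equiv track=rewrite | github.com/krautz/codeforces | algorithms/graph/dfs.py | dfs
-- ===== SOURCE A (Python) =====
-- def dfs(node, parent, graph, parents, start, end, time):
--     """
--     I recuservly perform dfs.
--
--     :param node: current node
--     :param parent: parent node of current nome
--     :param graph: graph
--     :param parents: nodes parents in dfs tree
--     :param start: start time of each node
--     :param end: end time of each node
--     :param time: current time
--
--     :returns: nothing
--     """
--     # node already visited: return current time
--     if parents[node] != -1:
--         return time
--
--     # set start time of current node
--     time += 1
--     start[node] = time
--     parents[node] = parent
--
--     # visit each node neighbour
--     for neighbour in graph[node]: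
--         time = dfs(neighbour, node, graph, parents, start, end, time)
--
--     # set end time
--     time += 1
--     end[node] = time
--
--     # return time
--     return time
-- ===== SOURCE B (Python) =====
-- def dfs(node, parent, graph, parents, start, end, time):
--     """Iterative DFS with an explicit stack of (node, parent, remaining-neighbours)
--     frames instead of recursion; mutates parents/start/end the same way and
--     returns the same final time."""
--     stack = [(node, parent, None)]
--     while stack:
--         n, p, rest = stack[-1]
--         if rest is None:
--             # first activation of this frame: visited guard, then entry actions
--             if parents[n] != -1:
--                 stack.pop()
--             else:
--                 time += 1
--                 start[n] = time
--                 parents[n] = p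
--                 stack[-1] = (n, p, list(graph[n]))
--         elif rest:
--             nb = rest[0]
--             stack[-1] = (n, p, rest[1:])
--             stack.append((nb, n, None))
--         else:
--             time += 1
--             end[n] = time
--             stack.pop()
--     return time
-- ===== Notes on version B (the rewrite author's own statement) =====
-- stated objective: alternative
-- what changed: A's recursive DFS is replaced by an iterative DFS driven by an explicit stack of (node, parent, remaining-neighbours) frames, with the visited guard applied when a frame is first activated; it performs the same mutations and returns the same final time without using the call stack.
-- outside the precondition, e.g. on dfs(-1, 2, [[]], [-1], [0], [0], 0): A returns 2, B returns 2; on dfs(0, 1, [[]], [-1], [0, 0], [0, 0], 0): A returns 2, B returns 2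
import Mathlib
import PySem

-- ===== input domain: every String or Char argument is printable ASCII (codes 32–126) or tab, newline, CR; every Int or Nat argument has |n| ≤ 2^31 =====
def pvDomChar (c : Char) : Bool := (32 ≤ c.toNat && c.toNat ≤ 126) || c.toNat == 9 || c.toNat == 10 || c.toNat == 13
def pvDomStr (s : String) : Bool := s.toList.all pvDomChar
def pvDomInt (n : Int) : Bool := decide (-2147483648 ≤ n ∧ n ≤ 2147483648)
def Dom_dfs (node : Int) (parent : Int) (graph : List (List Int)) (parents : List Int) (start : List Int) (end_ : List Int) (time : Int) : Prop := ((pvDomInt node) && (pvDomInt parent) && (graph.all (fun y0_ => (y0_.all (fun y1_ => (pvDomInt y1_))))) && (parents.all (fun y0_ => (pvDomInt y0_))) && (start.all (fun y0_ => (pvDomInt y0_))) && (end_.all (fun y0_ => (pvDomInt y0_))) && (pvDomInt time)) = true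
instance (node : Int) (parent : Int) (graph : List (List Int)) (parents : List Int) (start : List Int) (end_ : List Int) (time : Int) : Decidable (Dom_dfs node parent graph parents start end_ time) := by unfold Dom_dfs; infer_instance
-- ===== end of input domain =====

-- B replaces A's recursion by an iterative DFS over an explicit stack of (node, parent,
-- remaining-neighbours) frames (objective: alternative decomposition, same cost); the Python
-- functions also mutate parents/start/end (identically), the theorems here are about the
-- returned time only.

-- ===== PORT A =====
-- shared read/write primitives for Python's 'l[i]' / 'l[i] = v' (negative indices wrap;
-- out-of-range raises in Python, which Pre_ excludes — the total forms below default there)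
def pvRd (l : List Int) (i : Int) : Int := (PySem.List.pyGet? l i).getD 0
def pvWr (l : List Int) (i : Int) (v : Int) : List Int := PySem.List.pySetD l i v

-- fuel bound for both ports: a potential that the recursion/loop is proved to respect
-- (each still-unvisited node can cost at most 2 time-steps plus a push per neighbour;
-- a root called with parent = -1 stays marked -1 and may be visited one extra time)
def pvPhi (graph : List (List Int)) (parents : List Int) : Nat :=
  ∑ i ∈ Finset.range graph.length,
    (if parents.getD i 0 = -1 then 2 + 2 * (graph.getD i []).length else 0)

def pvFuel (graph : List (List Int)) (parents : List Int) (node : Int) : Nat :=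
  pvPhi graph parents + 2 * ((PySem.List.pyGet? graph node).getD []).length + 2 + 1

-- literal port of A's recursion; fuel = pvFuel is proved sufficient on Pre_ inputs
mutual
def dfsAux (graph : List (List Int)) (fuel : Nat) (node parent : Int)
    (parents start end_ : List Int) (time : Int) :
    Option (List Int × List Int × List Int × Int) :=
  match fuel with
  | 0 => none
  | fuel + 1 =>
    if pvRd parents node ≠ -1 then some (parents, start, end_, time)
    else
      let time := time + 1
      let start := pvWr start node time
      let parents := pvWr parents node parent
      match dfsLoop graph fuel ((PySem.List.pyGet? graph node).getD []) node parents start end_ time with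
      | none => none
      | some (parents, start, end_, time) =>
        let time := time + 1
        let end_ := pvWr end_ node time
        some (parents, start, end_, time)
termination_by (fuel, 0)

def dfsLoop (graph : List (List Int)) (fuel : Nat) (nbs : List Int) (node : Int)
    (parents start end_ : List Int) (time : Int) :
    Option (List Int × List Int × List Int × Int) :=
  match nbs with
  | [] => some (parents, start, end_, time)
  | nb :: rest =>
    match dfsAux graph fuel nb node parents start end_ time with
    | none => none
    | some (parents, start, end_, time) => dfsLoop graph fuel rest node parents start end_ time
termination_by (fuel, nbs.length + 1)
end

def dfs (node : Int) (parent : Int) (graph : List (List Int)) (parents : List Int) (start : List Int) (end_ : List Int) (time : Int) : Int :=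
  match dfsAux graph (pvFuel graph parents node) node parent parents start end_ time with
  | some (_, _, _, t) => t
  | none => time

-- ===== PORT B =====
-- stack machine of Source B: frames (n, p, none = not yet activated | some rest = remaining neighbours)
def runB (graph : List (List Int)) (fuel : Nat) (stk : List (Int × Int × Option (List Int)))
    (parents start end_ : List Int) (time : Int) : Option Int :=
  match stk with
  | [] => some time
  | (n, p, rest?) :: stk =>
    match fuel with
    | 0 => none
    | fuel + 1 =>
      match rest? with
      | none =>
        if pvRd parents n ≠ -1 then runB graph fuel stk parents start end_ time
        else
          let time := time + 1
          let start := pvWr start n time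
          let parents := pvWr parents n p
          runB graph fuel ((n, p, some ((PySem.List.pyGet? graph n).getD [])) :: stk) parents start end_ time
      | some [] =>
        let time := time + 1
        let end_ := pvWr end_ n time
        runB graph fuel stk parents start end_ time
      | some (nb :: rest) =>
        runB graph fuel ((nb, n, none) :: (n, p, some rest) :: stk) parents start end_ time

def dfs_alt (node : Int) (parent : Int) (graph : List (List Int)) (parents : List Int) (start : List Int) (end_ : List Int) (time : Int) : Int :=
  match runB graph (pvFuel graph parents node) [(node, parent, none)] parents start end_ time with
  | some t => t
  | none => time

-- ===== PRECONDITION & SPEC =====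
-- Pre_ excludes calls on which A raises — node out of range (IndexError at the guard), and
-- activating calls whose exploration can hit an out-of-range index (IndexError) or, through
-- -1-valued nodes colliding with the -1 'unvisited' sentinel, recurse forever (RecursionError);
-- stating this in closed form requires, on activating calls, equal array lengths and all
-- indices in [0, n), which also puts aside the negative-index-wraparound and longer-array
-- corners where A happens to return (B returns the same value there, but they are outside
-- this claim).  A guard-hit call is admitted for any in-range node.
def Pre_dfs (node : Int) (parent : Int) (graph : List (List Int)) (parents : List Int) (start : List Int) (end_ : List Int) (time : Int) : Prop :=
  PySem.Raise.InRange parents.length node ∧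
  (PySem.List.pyGet? parents node ≠ some (-1) ∨
    (0 ≤ node ∧ node < (graph.length : Int) ∧
      parents.length = graph.length ∧ start.length = graph.length ∧ end_.length = graph.length ∧
      ∀ l ∈ graph, ∀ x ∈ l, 0 ≤ x ∧ x < (graph.length : Int)))
instance (node : Int) (parent : Int) (graph : List (List Int)) (parents : List Int) (start : List Int) (end_ : List Int) (time : Int) : Decidable (Pre_dfs node parent graph parents start end_ time) := by unfold Pre_dfs; infer_instance

def pvWitness_dfs : Int × Int × List (List Int) × List Int × List Int × List Int × Int :=
  (0, -1, [[1], []], [-1, -1], [0, 0], [0, 0], 0)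

def Spec_dfs (node : Int) (parent : Int) (graph : List (List Int)) (parents : List Int) (start : List Int) (end_ : List Int) (time : Int) (out : Int) : Prop := out = dfs_alt node parent graph parents start end_ time
instance (node : Int) (parent : Int) (graph : List (List Int)) (parents : List Int) (start : List Int) (end_ : List Int) (time : Int) (out : Int) : Decidable (Spec_dfs node parent graph parents start end_ time out) := by unfold Spec_dfs; infer_instance

-- ===== CLAIM (what is proved, stated in full; the proofs are below) =====
def Claim_equal_dfs : Prop := ∀ (node : Int) (parent : Int) (graph : List (List Int)) (parents : List Int) (start : List Int) (end_ : List Int) (time : Int), Dom_dfs node parent graph parents start end_ time → Pre_dfs node parent graph parents start end_ time → Spec_dfs node parent graph parents start end_ time (dfs node parent graph parents start end_ time)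

-- ===== LEMMAS AND PROOFS =====

-- basic facts about the read/write primitives
theorem pvRd_eq (l : List Int) (i : Int) (h0 : 0 ≤ i) (_h1 : i.toNat < l.length) :
    pvRd l i = l.getD i.toNat 0 := by
  unfold pvRd
  rw [PySem.List.pyGet?_of_nonneg l h0, List.getD_eq_getElem?_getD]

theorem pvWr_eq (l : List Int) (i v : Int) (h0 : 0 ≤ i) (h1 : i.toNat < l.length) :
    pvWr l i v = l.set i.toNat v := by
  unfold pvWr PySem.List.pySetD PySem.List.pySet? PySem.List.pyIdx?
  rw [if_pos h0, if_pos (by omega : i < (l.length : Int))]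
  simp

-- the potential drops by exactly this node's weight when an unvisited node is marked ≠ -1
theorem pvPhi_set (graph : List (List Int)) (ps : List Int) (j : Nat) (v : Int)
    (hj : j < graph.length) (hlen : ps.length = graph.length)
    (hold : ps.getD j 0 = -1) (hv : v ≠ -1) :
    pvPhi graph (ps.set j v) + (2 + 2 * (graph.getD j []).length) = pvPhi graph ps := by
  unfold pvPhi
  have hjm : j ∈ Finset.range graph.length := Finset.mem_range.mpr hj
  rw [← Finset.sum_erase_add _ _ hjm, ← Finset.sum_erase_add _ _ hjm]
  have hterm : ((ps.set j v).getD j 0) = v := by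
    rw [List.getD_eq_getElem?_getD, List.getElem?_set_self (by omega)]; rfl
  have hsame : ∀ i ∈ (Finset.range graph.length).erase j,
      (if (ps.set j v).getD i 0 = -1 then 2 + 2 * (graph.getD i []).length else 0)
      = (if ps.getD i 0 = -1 then 2 + 2 * (graph.getD i []).length else 0) := by
    intro i hi
    have hne : j ≠ i := fun h => (Finset.mem_erase.mp hi).1 h.symm
    rw [List.getD_eq_getElem?_getD, List.getElem?_set_ne hne, ← List.getD_eq_getElem?_getD]
  rw [Finset.sum_congr rfl hsame, hterm, if_neg hv, if_pos hold]
  omega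

-- re-writing the value already present changes nothing (root activation with parent = -1)
theorem set_self_eq (ps : List Int) (j : Nat) (v : Int)
    (hj : j < ps.length) (hold : ps.getD j 0 = v) : ps.set j v = ps := by
  apply List.ext_getElem?
  intro i
  by_cases h : j = i
  · subst h
    rw [List.getElem?_set_self (by omega)]
    rw [List.getD_eq_getElem?_getD, List.getElem?_eq_getElem hj] at hold
    simp at hold
    rw [List.getElem?_eq_getElem hj, hold]
  · rw [List.getElem?_set_ne h]

-- one-step reductions of the stack machine
theorem runB_push (graph : List (List Int)) (k : Nat) (stk : List (Int × Int × Option (List Int)))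
    (n p nb : Int) (rest : List Int) (ps st en : List Int) (t : Int) :
    runB graph (k + 1) ((n, p, some (nb :: rest)) :: stk) ps st en t
      = runB graph k ((nb, n, none) :: (n, p, some rest) :: stk) ps st en t := by
  simp [runB]

theorem runB_exit (graph : List (List Int)) (k : Nat) (stk : List (Int × Int × Option (List Int)))
    (n p : Int) (ps st en : List Int) (t : Int) :
    runB graph (k + 1) ((n, p, some []) :: stk) ps st en t
      = runB graph k stk ps st (pvWr en n (t + 1)) (t + 1) := by
  simp [runB]

theorem runB_guard (graph : List (List Int)) (k : Nat) (stk : List (Int × Int × Option (List Int)))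
    (n p : Int) (ps st en : List Int) (t : Int) (h : pvRd ps n ≠ -1) :
    runB graph (k + 1) ((n, p, none) :: stk) ps st en t = runB graph k stk ps st en t := by
  simp [runB, h]

theorem runB_activate (graph : List (List Int)) (k : Nat) (stk : List (Int × Int × Option (List Int)))
    (n p : Int) (ps st en : List Int) (t : Int) (h : pvRd ps n = -1) :
    runB graph (k + 1) ((n, p, none) :: stk) ps st en t
      = runB graph k ((n, p, some ((PySem.List.pyGet? graph n).getD [])) :: stk)
          (pvWr ps n p) (pvWr st n (t + 1)) en (t + 1) := by
  simp [runB, h]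

-- statements for the mutual inductions (proof-side only)
def AuxTot (graph : List (List Int)) (fuel : Nat) : Prop :=
  ∀ (node parent : Int) (ps st en : List Int) (t : Int),
    (∀ l ∈ graph, ∀ x ∈ l, 0 ≤ x ∧ x < (graph.length : Int)) →
    ps.length = graph.length → 0 ≤ node → node < (graph.length : Int) → parent ≠ -1 →
    pvPhi graph ps < fuel →
    ∃ ps' st' en' t', dfsAux graph fuel node parent ps st en t = some (ps', st', en', t') ∧
      ps'.length = graph.length ∧ pvPhi graph ps' ≤ pvPhi graph ps

def LoopTot (graph : List (List Int)) (fuel : Nat) : Prop :=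
  ∀ (nbs : List Int) (node : Int) (ps st en : List Int) (t : Int),
    (∀ l ∈ graph, ∀ x ∈ l, 0 ≤ x ∧ x < (graph.length : Int)) →
    ps.length = graph.length → (∀ nb ∈ nbs, 0 ≤ nb ∧ nb < (graph.length : Int)) → 0 ≤ node →
    pvPhi graph ps < fuel →
    ∃ ps' st' en' t', dfsLoop graph fuel nbs node ps st en t = some (ps', st', en', t') ∧
      ps'.length = graph.length ∧ pvPhi graph ps' ≤ pvPhi graph ps

def SimAuxOk (graph : List (List Int)) (fuel : Nat) : Prop :=
  ∀ (node parent : Int) (ps st en : List Int) (t : Int) (ps' st' en' : List Int) (t' : Int),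
    (∀ l ∈ graph, ∀ x ∈ l, 0 ≤ x ∧ x < (graph.length : Int)) →
    ps.length = graph.length → 0 ≤ node → node < (graph.length : Int) → parent ≠ -1 →
    dfsAux graph fuel node parent ps st en t = some (ps', st', en', t') →
    ∃ k, (∀ m stk, runB graph (k + m) ((node, parent, none) :: stk) ps st en t
            = runB graph m stk ps' st' en' t') ∧
      k + pvPhi graph ps' ≤ 1 + pvPhi graph ps ∧ ps'.length = graph.length

def SimLoopOk (graph : List (List Int)) (fuel : Nat) : Prop :=
  ∀ (nbs : List Int) (node : Int) (ps st en : List Int) (t : Int) (ps' st' en' : List Int) (t' : Int),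
    (∀ l ∈ graph, ∀ x ∈ l, 0 ≤ x ∧ x < (graph.length : Int)) →
    ps.length = graph.length → (∀ nb ∈ nbs, 0 ≤ nb ∧ nb < (graph.length : Int)) → 0 ≤ node →
    dfsLoop graph fuel nbs node ps st en t = some (ps', st', en', t') →
    ∃ k, (∀ m stk p0, runB graph (k + m) ((node, p0, some nbs) :: stk) ps st en t
            = runB graph m ((node, p0, some []) :: stk) ps' st' en' t') ∧
      k + pvPhi graph ps' ≤ 2 * nbs.length + pvPhi graph ps ∧ ps'.length = graph.length

theorem loopTot (graph : List (List Int)) (fuel : Nat) (ihA : AuxTot graph fuel) :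
    LoopTot graph fuel := by
  intro nbs
  induction nbs with
  | nil =>
    intro node ps st en t hGI hlen hbb hnode hfuel
    exact ⟨ps, st, en, t, by simp [dfsLoop], hlen, le_refl _⟩
  | cons nb rest ih =>
    intro node ps st en t hGI hlen hbb hnode hfuel
    obtain ⟨hnb0, hnb1⟩ := hbb nb (by simp)
    obtain ⟨ps1, st1, en1, t1, hA, hlen1, hphi1⟩ :=
      ihA nb node ps st en t hGI hlen hnb0 hnb1 (by omega) hfuel
    obtain ⟨ps', st', en', t', hL, hlen', hphi'⟩ :=
      ih node ps1 st1 en1 t1 hGI hlen1 (fun x hx => hbb x (by simp [hx])) hnode (by omega)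
    exact ⟨ps', st', en', t', by simp [dfsLoop, hA, hL], hlen', le_trans hphi' hphi1⟩

theorem auxTot (graph : List (List Int)) : ∀ fuel, AuxTot graph fuel := by
  intro fuel
  induction fuel with
  | zero =>
    intro node parent ps st en t hGI hlen h0 h1 hp hfuel
    omega
  | succ fuel ih =>
    intro node parent ps st en t hGI hlen h0 h1 hp hfuel
    by_cases hg : pvRd ps node = -1
    · have hlt : node.toNat < ps.length := by omega
      have hold : ps.getD node.toNat 0 = -1 := by rw [← pvRd_eq ps node h0 hlt]; exact hg
      have hltg : node.toNat < graph.length := by omega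
      have hnbs : (PySem.List.pyGet? graph node).getD [] = graph.getD node.toNat [] := by
        rw [PySem.List.pyGet?_of_nonneg graph h0, List.getD_eq_getElem?_getD]
      have hnbsmem : graph.getD node.toNat [] ∈ graph := by
        rw [List.getD_eq_getElem?_getD, List.getElem?_eq_getElem hltg]
        exact List.getElem_mem _
      have hbb := hGI _ hnbsmem
      have hwr : pvWr ps node parent = ps.set node.toNat parent := pvWr_eq ps node parent h0 hlt
      have hphi1 := pvPhi_set graph ps node.toNat parent hltg hlen hold hp
      obtain ⟨ps2, st2, en2, t2, hL, hlen2, hphi2⟩ :=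
        loopTot graph fuel ih (graph.getD node.toNat []) node (ps.set node.toNat parent)
          (pvWr st node (t + 1)) en (t + 1) hGI (by rw [List.length_set]; exact hlen) hbb h0
          (by omega)
      refine ⟨ps2, st2, pvWr en2 node (t2 + 1), t2 + 1, ?_, hlen2, by omega⟩
      simp only [List.getD_eq_getElem?_getD] at hL
      simp [dfsAux, hg, hwr, hnbs, hL, List.getD_eq_getElem?_getD]
    · refine ⟨ps, st, en, t, ?_, hlen, le_refl _⟩
      simp [dfsAux, hg]

theorem simLoop (graph : List (List Int)) (fuel : Nat) (ihA : SimAuxOk graph fuel) :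
    SimLoopOk graph fuel := by
  intro nbs
  induction nbs with
  | nil =>
    intro node ps st en t ps' st' en' t' hGI hlen hbb hnode hstep
    simp [dfsLoop] at hstep
    obtain ⟨e1, e2, e3, e4⟩ := hstep
    subst e1; subst e2; subst e3; subst e4
    exact ⟨0, fun m stk p0 => by rw [Nat.zero_add], by omega, hlen⟩
  | cons nb rest ih =>
    intro node ps st en t ps' st' en' t' hGI hlen hbb hnode hstep
    obtain ⟨hnb0, hnb1⟩ := hbb nb (by simp)
    cases hA : dfsAux graph fuel nb node ps st en t with
    | none => simp [dfsLoop, hA] at hstep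
    | some s1 =>
      obtain ⟨ps1, st1, en1, t1⟩ := s1
      simp only [dfsLoop, hA] at hstep
      obtain ⟨kA, hsimA, hbA, hlen1⟩ :=
        ihA nb node ps st en t ps1 st1 en1 t1 hGI hlen hnb0 hnb1 (by omega) hA
      obtain ⟨kL, hsimL, hbL, hlen'⟩ :=
        ih node ps1 st1 en1 t1 ps' st' en' t' hGI hlen1 (fun x hx => hbb x (by simp [hx])) hnode hstep
      refine ⟨1 + kA + kL, ?_, by simp; omega, hlen'⟩
      intro m stk p0
      have e : 1 + kA + kL + m = (kA + (kL + m)) + 1 := by omega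
      rw [e, runB_push, hsimA, hsimL]

theorem simAux (graph : List (List Int)) : ∀ fuel, SimAuxOk graph fuel := by
  intro fuel
  induction fuel with
  | zero =>
    intro node parent ps st en t ps' st' en' t' hGI hlen h0 h1 hp hstep
    simp [dfsAux] at hstep
  | succ fuel ih =>
    intro node parent ps st en t ps' st' en' t' hGI hlen h0 h1 hp hstep
    by_cases hg : pvRd ps node = -1
    · have hlt : node.toNat < ps.length := by omega
      have hold : ps.getD node.toNat 0 = -1 := by rw [← pvRd_eq ps node h0 hlt]; exact hg
      have hltg : node.toNat < graph.length := by omega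
      have hnbs : (PySem.List.pyGet? graph node).getD [] = graph.getD node.toNat [] := by
        rw [PySem.List.pyGet?_of_nonneg graph h0, List.getD_eq_getElem?_getD]
      have hnbsmem : graph.getD node.toNat [] ∈ graph := by
        rw [List.getD_eq_getElem?_getD, List.getElem?_eq_getElem hltg]
        exact List.getElem_mem _
      have hbb := hGI _ hnbsmem
      have hwr : pvWr ps node parent = ps.set node.toNat parent := pvWr_eq ps node parent h0 hlt
      have hphi1 := pvPhi_set graph ps node.toNat parent hltg hlen hold hp
      simp only [dfsAux, hg, ne_eq, not_true_eq_false, if_false, hwr, hnbs] at hstep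
      rcases hL : dfsLoop graph fuel (graph.getD node.toNat []) node (ps.set node.toNat parent)
          (pvWr st node (t + 1)) en (t + 1) with _ | ⟨⟨ps2, st2, en2, t2⟩⟩
      · rw [hL] at hstep; simp at hstep
      · rw [hL] at hstep; simp at hstep
        obtain ⟨e1, e2, e3, e4⟩ := hstep
        subst e1; subst e2; subst e3; subst e4
        obtain ⟨kL, hsimL, hbL, hlen2⟩ :=
          simLoop graph fuel ih (graph.getD node.toNat []) node (ps.set node.toNat parent)
            (pvWr st node (t + 1)) en (t + 1) ps2 st2 en2 t2 hGI
            (by rw [List.length_set]; exact hlen) hbb h0 hL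
        refine ⟨kL + 2, ?_, by omega, hlen2⟩
        intro m stk
        have e : kL + 2 + m = (kL + (1 + m)) + 1 := by omega
        have e2 : 1 + m = m + 1 := by omega
        rw [e, runB_activate graph _ stk node parent ps st en t hg, hwr, hnbs, hsimL, e2,
          runB_exit]
    · simp only [dfsAux, hg, ne_eq, not_false_eq_true, if_true, Option.some.injEq,
        Prod.mk.injEq] at hstep
      obtain ⟨e1, e2, e3, e4⟩ := hstep
      subst e1; subst e2; subst e3; subst e4
      refine ⟨1, ?_, by omega, hlen⟩
      intro m stk
      have e : 1 + m = m + 1 := by omega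
      rw [e, runB_guard graph m stk node parent ps st en t hg]

-- ===== VERDICT (by name: the statement is the Claim_ definition above) =====
theorem dfs_spec : Claim_equal_dfs := by
  intro node parent graph parents start end_ time hDom hPre
  obtain ⟨hIR, hcase⟩ := hPre
  unfold Spec_dfs
  by_cases hg : pvRd parents node = -1
  · have hfull : 0 ≤ node ∧ node < (graph.length : Int) ∧
        parents.length = graph.length ∧ start.length = graph.length ∧
        end_.length = graph.length ∧
        ∀ l ∈ graph, ∀ x ∈ l, 0 ≤ x ∧ x < (graph.length : Int) := by
      rcases hcase with h | h
      · exfalso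
        cases hpg : PySem.List.pyGet? parents node with
        | none =>
          exact ((PySem.List.pyGet?_eq_none_iff parents node).mp hpg) hIR
        | some x =>
          apply h
          rw [hpg]
          have : pvRd parents node = x := by unfold pvRd; rw [hpg]; rfl
          rw [← hg, this]
      · exact h
    obtain ⟨h0, h1, hlenp, _, _, hGI⟩ := hfull
    by_cases hp : parent = -1
    · -- root call with parent = -1: the root is re-marked -1 (a no-op), children use
      -- parent = node ≥ 0; one extra node weight of fuel covers the root's own frame
      subst hp
      have hlt : node.toNat < parents.length := by omega
      have hltg : node.toNat < graph.length := by omega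
      have hold : parents.getD node.toNat 0 = -1 := by
        rw [← pvRd_eq parents node h0 hlt]; exact hg
      have hnbs : (PySem.List.pyGet? graph node).getD [] = graph.getD node.toNat [] := by
        rw [PySem.List.pyGet?_of_nonneg graph h0, List.getD_eq_getElem?_getD]
      have hnbsmem : graph.getD node.toNat [] ∈ graph := by
        rw [List.getD_eq_getElem?_getD, List.getElem?_eq_getElem hltg]
        exact List.getElem_mem _
      have hbb := hGI _ hnbsmem
      have hwr : pvWr parents node (-1) = parents := by
        rw [pvWr_eq parents node (-1) h0 hlt, set_self_eq parents node.toNat (-1) hlt hold]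
      have hDlen : ((PySem.List.pyGet? graph node).getD []).length
          = (graph.getD node.toNat []).length := by rw [hnbs]
      obtain ⟨ps2, st2, en2, t2, hL, hlen2, hphi2⟩ :=
        loopTot graph (pvPhi graph parents + 2 * ((PySem.List.pyGet? graph node).getD []).length + 2)
          (auxTot graph _) (graph.getD node.toNat []) node parents
          (pvWr start node (time + 1)) end_ (time + 1) hGI hlenp hbb h0 (by omega)
      rw [hDlen] at hL
      have hA : dfsAux graph (pvFuel graph parents node) node (-1) parents start end_ time
          = some (ps2, st2, pvWr en2 node (t2 + 1), t2 + 1) := by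
        unfold pvFuel
        simp only [dfsAux, hg, ne_eq, not_true_eq_false, if_false, hwr, hnbs]
        rw [hL]
      obtain ⟨k, hsimL, hbL, _⟩ :=
        simLoop graph (pvPhi graph parents + 2 * (graph.getD node.toNat []).length + 2)
          (simAux graph _) (graph.getD node.toNat []) node parents
          (pvWr start node (time + 1)) end_ (time + 1) ps2 st2 en2 t2 hGI hlenp hbb h0 hL
      have hrun : runB graph (pvFuel graph parents node) [(node, -1, none)] parents start end_ time
          = some (t2 + 1) := by
        unfold pvFuel
        rw [hDlen, runB_activate graph _ [] node (-1) parents start end_ time hg, hwr, hnbs]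
        have hk : k ≤ 2 * (graph.getD node.toNat []).length + pvPhi graph parents := by omega
        have e : pvPhi graph parents + 2 * (graph.getD node.toNat []).length + 2
            = k + (pvPhi graph parents + 2 * (graph.getD node.toNat []).length + 2 - k) := by
          omega
        rw [e, hsimL]
        have e2 : pvPhi graph parents + 2 * (graph.getD node.toNat []).length + 2 - k
            = (pvPhi graph parents + 2 * (graph.getD node.toNat []).length + 1 - k) + 1 := by
          omega
        rw [e2, runB_exit]
        simp [runB]
      unfold dfs dfs_alt
      rw [hA, hrun]
    · obtain ⟨ps', st', en', t', hA, hlen', hphi'⟩ :=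
        auxTot graph (pvFuel graph parents node) node parent parents start end_ time hGI hlenp h0 h1
          hp (by unfold pvFuel; omega)
      obtain ⟨k, hsim, hb, _⟩ :=
        simAux graph (pvFuel graph parents node) node parent parents start end_ time ps' st' en' t'
          hGI hlenp h0 h1 hp hA
      have hrun : runB graph (pvFuel graph parents node) [(node, parent, none)] parents start end_ time
          = some t' := by
        have h2 : pvFuel graph parents node = k + (pvFuel graph parents node - k) := by
          unfold pvFuel; unfold pvFuel at *; omega
        rw [h2, hsim]
        simp [runB]
      unfold dfs dfs_alt
      rw [hA, hrun]
  · have hgr : pvRd parents node ≠ -1 := hg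
    unfold dfs dfs_alt
    have hA : dfsAux graph (pvFuel graph parents node) node parent parents start end_ time
        = some (parents, start, end_, time) := by
      unfold pvFuel
      simp [dfsAux, hgr]
    have hB : runB graph (pvFuel graph parents node) [(node, parent, none)] parents start end_ time
        = some time := by
      unfold pvFuel
      rw [runB_guard graph _ _ node parent parents start end_ time hgr]
      simp [runB]
    rw [hA, hB]
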